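-- pv_equiv track=rewrite | github.com/JayantTaneja/Disk-Scheduling-Algorithm-Visualizer | algos.py | lscan
-- ===== SOURCE A (Python) =====
-- def lscan(request:list, initial_head_pos=53, disk_size = 200):
--     '''
--     Left Direction Utility for SCAN Scheduling
--
--     ### Returns:
--     - thm : Total Head Movement [Int]
--     - path_taken : Path Taken [Array of ints]
--
--     ### Params:
--     - request : Array of sectors
--     - inital_head_pos : Inital Sector Location Of Head
--     - disk_size : Total no of sectors in disk
--     '''
--
--     thm = 0
--     curr_head_pos = initial_head_pos
--     path_taken = [initial_head_pos]
--
--     greater = [sector for sector in request if sector>initial_head_pos]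
--     smaller = [sector for sector in request if sector<=initial_head_pos]
--
--     greater.sort()
--     smaller.sort(reverse=True)
--
--     # Traverse all the sectors behind initial head position
--     for sector in smaller:
--         next_sector = sector
--         path_taken.append(next_sector)
--         thm+=abs(next_sector-curr_head_pos)
--         curr_head_pos = next_sector
--
--     # Travel To Boundary and Change Direction
--     next_sector=0
--     path_taken.append(next_sector)
--     thm+=abs(next_sector-curr_head_pos)
--     curr_head_pos = next_sector
--
--     # Traverse all the sectors ahead of initial head position
--     for sector in greater:
--         next_sector = sector
--         path_taken.append(next_sector)
--         thm+=abs(next_sector-curr_head_pos)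
--         curr_head_pos = next_sector
--
--
--
--     return thm, path_taken
-- ===== SOURCE B (Python) =====
-- def lscan(request: list, initial_head_pos=53, disk_size=200):
--     # Closed-form total head movement: monotone-down-then-up path telescopes.
--     greater = sorted(s for s in request if s > initial_head_pos)
--     smaller = sorted((s for s in request if s <= initial_head_pos), reverse=True)
--     path_taken = [initial_head_pos] + smaller + [0] + greater
--     m = smaller[-1] if smaller else initial_head_pos
--     up = abs(greater[0]) + (greater[-1] - greater[0]) if greater else 0
--     thm = (initial_head_pos - m) + abs(m) + up
--     return thm, path_taken
-- ===== Notes on version B (the rewrite author's own statement) =====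
-- stated objective: alternative
-- what changed: B builds the path by list concatenation and replaces A's running-sum loops by a closed-form total head movement (initial - m) + |m| + (|g0| + glast - g0), justified by the down-then-up monotone shape of the path.
import Mathlib
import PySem

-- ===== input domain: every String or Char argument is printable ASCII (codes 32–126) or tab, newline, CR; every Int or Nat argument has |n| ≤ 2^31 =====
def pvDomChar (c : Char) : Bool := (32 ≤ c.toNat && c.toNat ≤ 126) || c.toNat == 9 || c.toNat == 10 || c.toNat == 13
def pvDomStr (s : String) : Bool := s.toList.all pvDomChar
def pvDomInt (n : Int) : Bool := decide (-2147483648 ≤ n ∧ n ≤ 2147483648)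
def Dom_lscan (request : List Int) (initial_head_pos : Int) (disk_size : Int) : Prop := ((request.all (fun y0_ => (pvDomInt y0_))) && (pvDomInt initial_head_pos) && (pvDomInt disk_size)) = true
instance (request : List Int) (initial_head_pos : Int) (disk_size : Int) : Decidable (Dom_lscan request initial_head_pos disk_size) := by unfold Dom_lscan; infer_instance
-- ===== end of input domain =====

-- B replaces A's running-sum loops with a closed-form total head movement; same path, same result.

-- ===== PORT A =====
-- A's loop body: state = (thm, curr_head_pos, path_taken)
def pvStep (st : Int × Int × List Int) (s : Int) : Int × Int × List Int :=
  (st.1 + |s - st.2.1|, s, st.2.2 ++ [s])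

def lscan (request : List Int) (initial_head_pos : Int) (disk_size : Int) : Int × List Int :=
  let greater := PySem.List.sorted (request.filter (fun s => decide (initial_head_pos < s))) (fun x => x) false
  let smaller := PySem.List.sorted (request.filter (fun s => decide (s ≤ initial_head_pos))) (fun x => x) true
  let st1 := smaller.foldl pvStep (0, initial_head_pos, [initial_head_pos])
  let st2 := (st1.1 + |(0 : Int) - st1.2.1|, (0 : Int), st1.2.2 ++ [(0 : Int)])
  let st3 := greater.foldl pvStep st2
  (st3.1, st3.2.2)

-- ===== PORT B =====
def lscan_alt (request : List Int) (initial_head_pos : Int) (disk_size : Int) : Int × List Int :=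
  let greater := PySem.List.sorted (request.filter (fun s => decide (initial_head_pos < s))) (fun x => x) false
  let smaller := PySem.List.sorted (request.filter (fun s => decide (s ≤ initial_head_pos))) (fun x => x) true
  let path_taken := [initial_head_pos] ++ smaller ++ [(0 : Int)] ++ greater
  let m := smaller.getLastD initial_head_pos
  let up : Int := match greater with
    | [] => 0
    | g :: _ => |g| + (greater.getLastD g - g)
  let thm := (initial_head_pos - m) + |m| + up
  (thm, path_taken)

-- ===== PRECONDITION & SPEC =====
def Spec_lscan (request : List Int) (initial_head_pos : Int) (disk_size : Int) (out : Int × List Int) : Prop := out = lscan_alt request initial_head_pos disk_size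
instance (request : List Int) (initial_head_pos : Int) (disk_size : Int) (out : Int × List Int) : Decidable (Spec_lscan request initial_head_pos disk_size out) := by unfold Spec_lscan; infer_instance

-- ===== CLAIM (what is proved, stated in full; the proofs are below) =====
def Claim_equal_lscan : Prop := ∀ (request : List Int) (initial_head_pos : Int) (disk_size : Int), Dom_lscan request initial_head_pos disk_size → Spec_lscan request initial_head_pos disk_size (lscan request initial_head_pos disk_size)

-- ===== LEMMAS AND PROOFS =====

theorem pvStep_path : ∀ (L : List Int) (t c : Int) (p : List Int),
    (L.foldl pvStep (t, c, p)).2.2 = p ++ L := by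
  intro L
  induction L with
  | nil => intro t c p; simp
  | cons a L ih => intro t c p; simp [pvStep, List.foldl_cons, ih]

theorem pvStep_curr : ∀ (L : List Int) (t c : Int) (p : List Int),
    (L.foldl pvStep (t, c, p)).2.1 = L.getLastD c := by
  intro L
  induction L with
  | nil => intro t c p; simp
  | cons a L ih =>
    intro t c p
    simp [pvStep, List.foldl_cons, ih]
    cases L with
    | nil => simp
    | cons h tl =>
      cases hy : (h :: tl).getLast? with
      | none => simp at hy
      | some y => simp [hy]

-- descending segment: the abs-differences telescope downwards
theorem pvStep_down : ∀ (L : List Int) (t c : Int) (p : List Int),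
    L.Pairwise (fun a b => b ≤ a) → (∀ x ∈ L, x ≤ c) →
    (L.foldl pvStep (t, c, p)).1 = t + (c - L.getLastD c) := by
  intro L
  induction L with
  | nil => intro t c p _ _; simp
  | cons a L ih =>
    intro t c p hp hc
    have ha : a ≤ c := hc a (by simp)
    have hp' := (List.pairwise_cons.mp hp)
    have : (L.foldl pvStep (t + |a - c|, a, p ++ [a])).1
        = (t + |a - c|) + (a - L.getLastD a) := ih _ _ _ hp'.2 hp'.1
    simp only [List.foldl_cons, pvStep] at *
    rw [this, List.getLastD_cons]
    have : |a - c| = c - a := by rw [abs_of_nonpos (by omega)]; omega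
    omega

-- ascending segment: the abs-differences telescope upwards
theorem pvStep_up : ∀ (L : List Int) (t c : Int) (p : List Int),
    L.Pairwise (fun a b => a ≤ b) → (∀ x ∈ L, c ≤ x) →
    (L.foldl pvStep (t, c, p)).1 = t + (L.getLastD c - c) := by
  intro L
  induction L with
  | nil => intro t c p _ _; simp
  | cons a L ih =>
    intro t c p hp hc
    have ha : c ≤ a := hc a (by simp)
    have hp' := (List.pairwise_cons.mp hp)
    have : (L.foldl pvStep (t + |a - c|, a, p ++ [a])).1
        = (t + |a - c|) + (L.getLastD a - a) := ih _ _ _ hp'.2 hp'.1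
    simp only [List.foldl_cons, pvStep] at *
    rw [this, List.getLastD_cons]
    have : |a - c| = a - c := by rw [abs_of_nonneg (by omega)]
    omega

-- ===== VERDICT (by name: the statement is the Claim_ definition above) =====
theorem lscan_spec : Claim_equal_lscan := by
  intro request initial_head_pos disk_size _
  unfold Spec_lscan lscan lscan_alt
  simp only []
  set greater := PySem.List.sorted (request.filter (fun s => decide (initial_head_pos < s))) (fun x => x) false with hg
  set smaller := PySem.List.sorted (request.filter (fun s => decide (s ≤ initial_head_pos))) (fun x => x) true with hs
  have hsp : smaller.Pairwise (fun a b => b ≤ a) := by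
    simpa using PySem.List.sorted_pairwise_rev (xs := request.filter (fun s => decide (s ≤ initial_head_pos))) (key := fun x => x)
  have hsle : ∀ x ∈ smaller, x ≤ initial_head_pos := by
    intro x hx
    rw [hs] at hx
    have := (PySem.List.mem_sorted (request.filter (fun s => decide (s ≤ initial_head_pos))) (fun x => x) true x).mp hx
    simp at this; exact this.2
  have hgp : greater.Pairwise (fun a b => a ≤ b) := by
    simpa using PySem.List.sorted_pairwise (xs := request.filter (fun s => decide (initial_head_pos < s))) (key := fun x => x)
  -- down part
  have h1t := pvStep_down smaller 0 initial_head_pos [initial_head_pos] hsp hsle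
  have h1c := pvStep_curr smaller 0 initial_head_pos [initial_head_pos]
  have h1p := pvStep_path smaller 0 initial_head_pos [initial_head_pos]
  set m := smaller.getLastD initial_head_pos with hm
  set st1 := smaller.foldl pvStep (0, initial_head_pos, [initial_head_pos]) with hst1
  -- boundary step
  have habs : |(0 : Int) - m| = |m| := by rw [show (0 : Int) - m = -m by ring, abs_neg]
  cases hgr : greater with
  | nil =>
    refine Prod.ext ?_ ?_
    · simp [h1t, h1c]
    · simp [h1p]
  | cons g L =>
    have hge : ∀ x ∈ L, g ≤ x := by
      have := (List.pairwise_cons.mp (hgr ▸ hgp)).1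
      exact this
    have hLp : L.Pairwise (fun a b => a ≤ b) := (List.pairwise_cons.mp (hgr ▸ hgp)).2
    have hup := pvStep_up L (st1.1 + |(0:Int) - st1.2.1| + |g - 0|) g
        (st1.2.2 ++ [(0:Int)] ++ [g]) hLp hge
    have hupc := pvStep_curr L (st1.1 + |(0:Int) - st1.2.1| + |g - 0|) g
        (st1.2.2 ++ [(0:Int)] ++ [g])
    have hupp := pvStep_path L (st1.1 + |(0:Int) - st1.2.1| + |g - 0|) g
        (st1.2.2 ++ [(0:Int)] ++ [g])
    simp only [hgr, List.foldl_cons, pvStep] at *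
    refine Prod.ext ?_ ?_
    · show (L.foldl pvStep _).1 = _
      rw [hup, h1t, h1c, habs, List.getLastD_cons]
      have : |g - 0| = |g| := by norm_num
      rw [this]
      omega
    · show (L.foldl pvStep _).2.2 = _
      rw [hupp, h1p]
      simp

-- end
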